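-- pv_equiv track=rewrite | github.com/hshk99/Autopack | src/autopack/plan_utils.py | merge_plans
-- ===== SOURCE A (Python) =====
-- from typing import Dict, List, Optional
--
-- def merge_plans(base: Dict, new: Dict, allow_update: bool = False) -> Dict:
--     merged = {"phases": []}
--     base_phases = {p["id"]: p for p in base.get("phases", [])}
--     for p in base.get("phases", []):
--         merged["phases"].append(p)
--
--     for p in new.get("phases", []):
--         pid = p.get("id")
--         if pid in base_phases:
--             if allow_update:
--                 # Replace existing phase with new one
--                 merged["phases"] = [p if ph["id"] == pid else ph for ph in merged["phases"]]
--             else: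
--                 # Skip duplicate ids if not allowed to update
--                 continue
--         else:
--             merged["phases"].append(p)
--     return merged
-- ===== SOURCE B (Python) =====
-- def merge_plans(base, new, allow_update=False):
--     base_list = base.get("phases", [])
--     base_ids = {p["id"] for p in base_list}
--     updates = {}
--     extras = []
--     for p in new.get("phases", []):
--         pid = p.get("id")
--         if pid in base_ids:
--             if allow_update:
--                 updates[pid] = p
--         else:
--             extras.append(p)
--     return {"phases": [updates.get(p["id"], p) for p in base_list] + extras}
-- ===== Notes on version B (the rewrite author's own statement) =====
-- stated objective: alternative
-- what changed: Instead of rebuilding the whole merged list for every duplicate id in new, B makes one splitting pass over new (an updates dict keyed by id plus an ordered extras list) and then builds the result in a single pass over the base phases followed by the extras.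
-- crash fix: On inputs whose base phases all carry an 'id' key but where (with allow_update) a new phase lacking 'id' precedes a new phase whose id matches a base id, A raises KeyError while B returns the merged plan. — e.g. on merge_plans([("phases", [[("id", 1)]])], [("phases", [[("x", 5)], [("id", 1), ("y", 7)]])], true): A raises KeyError, B returns [("phases", [[("id", 1), ("y", 7)], [("x", 5)]])]
import Mathlib
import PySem

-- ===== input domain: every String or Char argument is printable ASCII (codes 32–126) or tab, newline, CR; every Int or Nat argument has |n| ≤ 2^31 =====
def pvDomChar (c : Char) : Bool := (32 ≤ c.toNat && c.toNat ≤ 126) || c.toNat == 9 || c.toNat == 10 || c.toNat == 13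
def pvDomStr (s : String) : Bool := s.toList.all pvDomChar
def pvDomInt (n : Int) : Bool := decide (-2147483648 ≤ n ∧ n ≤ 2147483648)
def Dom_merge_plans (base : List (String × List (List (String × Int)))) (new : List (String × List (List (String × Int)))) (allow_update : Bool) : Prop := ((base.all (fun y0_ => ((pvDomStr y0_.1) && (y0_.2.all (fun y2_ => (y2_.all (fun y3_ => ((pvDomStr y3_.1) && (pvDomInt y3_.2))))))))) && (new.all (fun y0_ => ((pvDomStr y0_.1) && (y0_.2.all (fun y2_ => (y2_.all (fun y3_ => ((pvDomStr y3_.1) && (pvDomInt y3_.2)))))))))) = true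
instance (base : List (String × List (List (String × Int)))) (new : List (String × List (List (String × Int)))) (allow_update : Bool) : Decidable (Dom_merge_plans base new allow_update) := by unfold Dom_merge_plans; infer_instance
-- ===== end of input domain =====

-- B replaces A's per-duplicate full rebuild of the merged list by one splitting pass over `new`
-- (an updates dict + an ordered extras list) and a single final pass over the base phases.

-- shared accessors (a Python dict arrives as an association list; first-match lookup via Dict.mk)
def pvGetPhases (d : List (String × List (List (String × Int)))) : List (List (String × Int)) :=
  ((PySem.Dict.mk d).get? "phases").getD []      -- d.get("phases", [])

def pvId? (p : List (String × Int)) : Option Int := (PySem.Dict.mk p).get? "id"   -- p.get("id")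

-- total form of p["id"]; Pre_ guarantees the key exists wherever it is evaluated
def pvId (p : List (String × Int)) : Int := (pvId? p).getD 0

-- ===== PORT A =====
def merge_plans (base : List (String × List (List (String × Int)))) (new : List (String × List (List (String × Int)))) (allow_update : Bool) : List (String × List (List (String × Int))) :=
  let basePh := pvGetPhases base
  let base_phases : PySem.Dict Int (List (String × Int)) :=
    basePh.foldl (fun d p => d.insert (pvId p) p) PySem.Dict.empty   -- {p["id"]: p for p in …}
  let merged0 : List (List (String × Int)) := basePh.foldl (fun m p => m ++ [p]) []
  let merged := (pvGetPhases new).foldl (fun m p =>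
    match pvId? p with                                    -- pid = p.get("id")
    | some k =>
      if base_phases.contains k then                      -- pid in base_phases
        if allow_update then m.map (fun ph => if pvId ph == k then p else ph)
        else m                                            -- continue
      else m ++ [p]
    | none => m ++ [p]                                    -- None is never a key (keys are ints)
    ) merged0
  [("phases", merged)]

-- ===== PORT B =====
def merge_plans_alt (base : List (String × List (List (String × Int)))) (new : List (String × List (List (String × Int)))) (allow_update : Bool) : List (String × List (List (String × Int))) :=
  let base_list := pvGetPhases base
  let base_ids : PySem.Set Int := PySem.Set.ofList (base_list.map pvId)   -- {p["id"] for p in base_list}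
  let st := (pvGetPhases new).foldl
    (fun (st : PySem.Dict Int (List (String × Int)) × List (List (String × Int))) p =>
      match pvId? p with
      | some k =>
        if PySem.Set.contains base_ids k then
          if allow_update then (st.1.insert k p, st.2) else st
        else (st.1, st.2 ++ [p])
      | none => (st.1, st.2 ++ [p]))
    (PySem.Dict.empty, [])
  [("phases", base_list.map (fun p => (st.1.get? (pvId p)).getD p) ++ st.2)]

-- ===== PRECONDITION & SPEC =====
-- pairwise condition on new phases: an id-less (appended) phase may not be followed by a
-- phase whose id is in the base ids (that later replacement would evaluate ph["id"] on it)
def pvOkPair (ids : List Int) (p q : List (String × Int)) : Bool :=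
  !(pvId? p).isNone || (match pvId? q with | some k => !ids.contains k | none => true)

-- Pre_ excludes exactly the inputs where A raises KeyError: a base phase without an "id" key,
-- or (with allow_update) a new phase lacking "id" followed by a new phase whose id is a base id.
def Pre_merge_plans (base : List (String × List (List (String × Int)))) (new : List (String × List (List (String × Int)))) (allow_update : Bool) : Prop :=
  (∀ p ∈ pvGetPhases base, (pvId? p).isSome = true) ∧
  (allow_update = true →
    (pvGetPhases new).Pairwise (fun p q => pvOkPair ((pvGetPhases base).map pvId) p q = true))
instance (base : List (String × List (List (String × Int)))) (new : List (String × List (List (String × Int)))) (allow_update : Bool) : Decidable (Pre_merge_plans base new allow_update) := by unfold Pre_merge_plans; infer_instance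

def pvWitness_merge_plans : (List (String × List (List (String × Int)))) × (List (String × List (List (String × Int)))) × Bool :=
  ([("phases", [[("id", 1), ("x", 2)]])], [("phases", [[("id", 1), ("x", 9)], [("id", 4)]])], true)

-- On inputs whose base phases all have "id" but where an id-less new phase precedes a
-- replacing one (allow_update), A raises KeyError while B returns the merged plan.
def Raises_merge_plans (base : List (String × List (List (String × Int)))) (new : List (String × List (List (String × Int)))) (allow_update : Bool) : Prop :=
  (∀ p ∈ pvGetPhases base, (pvId? p).isSome = true) ∧ allow_update = true ∧
  ¬ (pvGetPhases new).Pairwise (fun p q => pvOkPair ((pvGetPhases base).map pvId) p q = true)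
instance (base : List (String × List (List (String × Int)))) (new : List (String × List (List (String × Int)))) (allow_update : Bool) : Decidable (Raises_merge_plans base new allow_update) := by unfold Raises_merge_plans; infer_instance

def pvRaiseWitness_merge_plans : (List (String × List (List (String × Int)))) × (List (String × List (List (String × Int)))) × Bool :=
  ([("phases", [[("id", 1)]])], [("phases", [[("x", 5)], [("id", 1), ("y", 7)]])], true)

def pvRaiseWitnessOut_merge_plans : List (String × List (List (String × Int))) :=
  [("phases", [[("id", 1), ("y", 7)], [("x", 5)]])]

def Spec_merge_plans (base : List (String × List (List (String × Int)))) (new : List (String × List (List (String × Int)))) (allow_update : Bool) (out : List (String × List (List (String × Int)))) : Prop := out = merge_plans_alt base new allow_update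
instance (base : List (String × List (List (String × Int)))) (new : List (String × List (List (String × Int)))) (allow_update : Bool) (out : List (String × List (List (String × Int)))) : Decidable (Spec_merge_plans base new allow_update out) := by unfold Spec_merge_plans; infer_instance

-- ===== CLAIM (what is proved, stated in full; the proofs are below) =====
def Claim_equal_merge_plans : Prop := ∀ (base : List (String × List (List (String × Int)))) (new : List (String × List (List (String × Int)))) (allow_update : Bool), Dom_merge_plans base new allow_update → Pre_merge_plans base new allow_update → Spec_merge_plans base new allow_update (merge_plans base new allow_update)
def Claim_raises_merge_plans : Prop := (∀ (base : List (String × List (List (String × Int)))) (new : List (String × List (List (String × Int)))) (allow_update : Bool), Dom_merge_plans base new allow_update → Raises_merge_plans base new allow_update → ¬ Pre_merge_plans base new allow_update) ∧ (Dom_merge_plans (pvRaiseWitness_merge_plans.1) (pvRaiseWitness_merge_plans.2.1) (pvRaiseWitness_merge_plans.2.2) ∧ Raises_merge_plans (pvRaiseWitness_merge_plans.1) (pvRaiseWitness_merge_plans.2.1) (pvRaiseWitness_merge_plans.2.2) ∧ merge_plans_alt (pvRaiseWitness_merge_plans.1) (pvRaiseWitness_merge_plans.2.1) (pvRaiseWitness_merge_plans.2.2)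 = pvRaiseWitnessOut_merge_plans)

-- ===== LEMMAS AND PROOFS =====

theorem main_loop :
    ∀ (np : List (List (String × Int))) (bp : List (List (String × Int)))
      (au : Bool) (u : PySem.Dict Int (List (String × Int))) (ex : List (List (String × Int))),
      (∀ k q, u.get? k = some q → pvId? q = some k) →
      (∀ e ∈ ex, ∀ k, pvId? e = some k → k ∉ bp.map pvId) →
      (au = true → (∃ e ∈ ex, pvId? e = none) →
        ∀ q ∈ np, ∀ k, pvId? q = some k → k ∉ bp.map pvId) →
      (au = true → np.Pairwise (fun p q => pvOkPair (bp.map pvId) p q = true)) →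
      np.foldl (fun m p =>
          match pvId? p with
          | some k =>
            if decide (k ∈ bp.map pvId) then
              if au then m.map (fun ph => if pvId ph == k then p else ph) else m
            else m ++ [p]
          | none => m ++ [p])
        (bp.map (fun ph => (u.get? (pvId ph)).getD ph) ++ ex) =
      (let st := np.foldl (fun st p =>
          match pvId? p with
          | some k =>
            if decide (k ∈ bp.map pvId) then
              if au then (st.1.insert k p, st.2) else st
            else (st.1, st.2 ++ [p])
          | none => (st.1, st.2 ++ [p])) (u, ex)
       bp.map (fun ph => (st.1.get? (pvId ph)).getD ph) ++ st.2) := by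
  intro np
  induction np with
  | nil => intro bp au u ex _ _ _ _; rfl
  | cons p np ih =>
    intro bp au u ex hu hex hblock hpw
    simp only [List.foldl_cons]
    cases hid : pvId? p with
    | none =>
      rw [List.append_assoc]
      refine ih bp au u (ex ++ [p]) hu ?_ ?_ ?_
      · intro e he k hk
        rcases List.mem_append.mp he with h | h
        · exact hex e h k hk
        · simp at h; subst h; rw [hid] at hk; cases hk
      · intro htrue _ q hq k hkq
        have hp := (List.pairwise_cons.mp (hpw htrue)).1 q hq
        simp only [pvOkPair, hid, Option.isNone_none, Bool.not_true, Bool.false_or, hkq] at hp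
        simpa using hp
      · intro htrue; exact (List.pairwise_cons.mp (hpw htrue)).2
    | some k =>
      by_cases hk : k ∈ bp.map pvId
      · simp only [hk, decide_true, if_true]
        cases au with
        | false =>
          refine ih bp false u ex hu hex ?_ ?_
          · intro h; cases h
          · intro h; cases h
        | true =>
          have hnoidless : ¬ (∃ e ∈ ex, pvId? e = none) := by
            intro hcon
            exact hblock rfl hcon p (List.mem_cons_self) k hid hk
          have hexmap : ex.map (fun ph => if pvId ph == k then p else ph) = ex := by
            have h1 : ex.map (fun ph => if pvId ph == k then p else ph) = ex.map id := by
              apply List.map_congr_left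
              intro e he
              cases hide : pvId? e with
              | none => exact absurd ⟨e, he, hide⟩ hnoidless
              | some j =>
                have hj : j ∉ bp.map pvId := hex e he j hide
                have hje : pvId e = j := by simp [pvId, hide]
                have hjk : j ≠ k := fun h => hj (h ▸ hk)
                rw [if_neg (by simp [hje, hjk])]
                rfl
            rw [h1, List.map_id]
          have hmap : (bp.map (fun ph => (u.get? (pvId ph)).getD ph) ++ ex).map
                (fun ph => if pvId ph == k then p else ph)
              = bp.map (fun ph => ((u.insert k p).get? (pvId ph)).getD ph) ++ ex := by
            rw [List.map_append, hexmap, List.map_map]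
            congr 1
            apply List.map_congr_left
            intro ph _
            cases hq : u.get? (pvId ph) with
            | some q =>
              have hq' := hu _ _ hq
              have hqe : pvId q = pvId ph := by simp [pvId, hq']
              by_cases he : pvId ph = k
              · rw [he] at hq hqe
                simp [Function.comp, hq, hqe, he, PySem.Dict.get?_insert]
              · simp [Function.comp, hq, hqe, he, PySem.Dict.get?_insert]
            | none =>
              by_cases he : pvId ph = k
              · rw [he] at hq
                simp [Function.comp, hq, he, PySem.Dict.get?_insert]
              · simp [Function.comp, hq, he, PySem.Dict.get?_insert]
          simp only [if_pos rfl]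
          rw [hmap]
          refine ih bp true (u.insert k p) ex ?_ hex ?_ ?_
          · intro k' q hq
            rw [PySem.Dict.get?_insert] at hq
            split at hq
            · next h => cases hq; subst h; exact hid
            · exact hu _ _ hq
          · intro _ hcon; exact absurd hcon hnoidless
          · intro htrue; exact (List.pairwise_cons.mp (hpw htrue)).2
      · simp only [hk, decide_false, if_false]
        rw [List.append_assoc]
        refine ih bp au u (ex ++ [p]) hu ?_ ?_ ?_
        · intro e he k' hk'
          rcases List.mem_append.mp he with h | h
          · exact hex e h k' hk'
          · simp at h; subst h; rw [hid] at hk'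
            cases hk'; exact hk
        · intro htrue hcon q hq k' hkq
          have : ∃ e ∈ ex, pvId? e = none := by
            rcases hcon with ⟨e, he, hide⟩
            rcases List.mem_append.mp he with h | h
            · exact ⟨e, h, hide⟩
            · simp at h; subst h; rw [hid] at hide; cases hide
          exact hblock htrue this q (List.mem_cons_of_mem _ hq) k' hkq
        · intro htrue; exact (List.pairwise_cons.mp (hpw htrue)).2

theorem pv_foldl_append_id (l : List (List (String × Int))) :
    ∀ init : List (List (String × Int)), l.foldl (fun m p => m ++ [p]) init = init ++ l := by
  induction l with
  | nil => intro init; simp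
  | cons p l ih => intro init; simp [List.foldl_cons, ih]

theorem pv_dict_contains (bp : List (List (String × Int))) (k : Int) :
    ((bp.foldl (fun d p => d.insert (pvId p) p)
        (PySem.Dict.empty : PySem.Dict Int (List (String × Int)))).contains k)
      = decide (k ∈ bp.map pvId) := by
  rw [PySem.Dict.contains_eq_decide_mem_keys, PySem.Dict.keys_foldl_insert_key]
  simp [PySem.Set.mem_ofList]

theorem pv_set_contains (l : List Int) (k : Int) :
    PySem.Set.contains (PySem.Set.ofList l) k = decide (k ∈ l) := by
  rw [Bool.eq_iff_iff]
  simp [PySem.Set.contains_iff, PySem.Set.mem_ofList]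

theorem merge_plans_spec : Claim_equal_merge_plans := by
  intro base new au _ hpre
  obtain ⟨hb, hpw⟩ := hpre
  unfold Spec_merge_plans merge_plans merge_plans_alt
  simp only [pv_dict_contains, pv_set_contains, pv_foldl_append_id, List.nil_append]
  have h := main_loop (pvGetPhases new) (pvGetPhases base) au PySem.Dict.empty []
      (fun k q hq => by simp [PySem.Dict.get?_empty] at hq)
      (by intro e he; cases he)
      (by intro _ hcon; rcases hcon with ⟨e, he, _⟩; cases he)
      hpw
  simpa [PySem.Dict.get?_empty] using h

@[simp] theorem merge_plans_raises : Claim_raises_merge_plans := by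
  unfold Claim_raises_merge_plans
  constructor
  · intro base new au _ hr hp
    exact hr.2.2 (hp.2 hr.2.1)
  · refine ⟨by decide, by decide, by decide⟩
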